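-- pv_equiv track=rewrite | github.com/Bishnu2430/12_SIREX | core/ip/ip_analyzer.py | _calculate_exposure_risk
-- ===== SOURCE A (Python) =====
-- from typing import Dict, Any, List, Optional
--
-- def _calculate_exposure_risk(exposures: List) -> str:
--     """Calculate overall exposure risk"""
--     if not exposures:
--         return "LOW"
--
--     severity_levels = [e.get("severity", "LOW") for e in exposures]
--
--     if "CRITICAL" in severity_levels:
--         return "CRITICAL"
--     elif "HIGH" in severity_levels:
--         return "HIGH"
--     elif "MEDIUM" in severity_levels:
--         return "MEDIUM"
--     else:
--         return "LOW"
-- ===== SOURCE B (Python) =====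
-- _RANK = {"LOW": 0, "MEDIUM": 1, "HIGH": 2, "CRITICAL": 3}
-- _LABELS = ["LOW", "MEDIUM", "HIGH", "CRITICAL"]
--
-- def _calculate_exposure_risk(exposures):
--     """Calculate overall exposure risk"""
--     best = 0
--     for e in exposures:
--         r = _RANK.get(e.get("severity", "LOW"), 0)
--         if r > best:
--             best = r
--     return _LABELS[best]
-- ===== Notes on version B (the rewrite author's own statement) =====
-- stated objective: alternative
-- what changed: Replaces the three separate membership scans over the severity list with a single pass that keeps a running maximum severity rank and maps it back to its label.
import Mathlib
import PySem

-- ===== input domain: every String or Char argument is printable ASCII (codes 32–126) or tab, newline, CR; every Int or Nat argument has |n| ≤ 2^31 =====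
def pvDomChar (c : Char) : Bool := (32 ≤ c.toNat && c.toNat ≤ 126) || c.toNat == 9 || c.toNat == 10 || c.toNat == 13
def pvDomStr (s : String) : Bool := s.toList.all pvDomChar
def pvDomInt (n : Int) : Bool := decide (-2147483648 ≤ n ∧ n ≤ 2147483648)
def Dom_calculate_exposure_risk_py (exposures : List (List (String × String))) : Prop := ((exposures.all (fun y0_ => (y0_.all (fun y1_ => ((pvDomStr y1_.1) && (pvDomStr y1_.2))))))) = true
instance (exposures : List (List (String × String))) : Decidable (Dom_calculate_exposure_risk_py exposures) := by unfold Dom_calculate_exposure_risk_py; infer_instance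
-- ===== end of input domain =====

-- B replaces A's three membership scans by one pass keeping a running maximum rank (alternative decomposition, same cost).

-- ===== PORT A =====
-- e.get("severity", "LOW")
def pvSev (e : List (String × String)) : String :=
  PySem.Dict.getD (PySem.Dict.mk e) "severity" "LOW"

def calculate_exposure_risk_py (exposures : List (List (String × String))) : String :=
  if exposures = [] then "LOW"
  else
    let severity_levels := exposures.map pvSev
    if severity_levels.contains "CRITICAL" then "CRITICAL"
    else if severity_levels.contains "HIGH" then "HIGH"
    else if severity_levels.contains "MEDIUM" then "MEDIUM"
    else "LOW"

-- ===== PORT B =====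
-- _RANK.get(s, 0)
def pvRank (s : String) : Nat :=
  PySem.Dict.getD (PySem.Dict.mk [("LOW", 0), ("MEDIUM", 1), ("HIGH", 2), ("CRITICAL", 3)]) s 0

def calculate_exposure_risk_py_alt (exposures : List (List (String × String))) : String :=
  let best := exposures.foldl (fun best e =>
    let r := pvRank (pvSev e)
    if r > best then r else best) 0
  ["LOW", "MEDIUM", "HIGH", "CRITICAL"].getD best "LOW"  -- _LABELS[best]; best ≤ 3 always, so getD is exact

-- ===== PRECONDITION & SPEC =====
def Spec_calculate_exposure_risk_py (exposures : List (List (String × String))) (out : String) : Prop := out = calculate_exposure_risk_py_alt exposures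
instance (exposures : List (List (String × String))) (out : String) : Decidable (Spec_calculate_exposure_risk_py exposures out) := by unfold Spec_calculate_exposure_risk_py; infer_instance

-- ===== CLAIM (what is proved, stated in full; the proofs are below) =====
def Claim_equal_calculate_exposure_risk_py : Prop := ∀ (exposures : List (List (String × String))), Dom_calculate_exposure_risk_py exposures → Spec_calculate_exposure_risk_py exposures (calculate_exposure_risk_py exposures)

-- ===== LEMMAS AND PROOFS =====

theorem pvRank_cases (s : String) :
    pvRank s = if s = "CRITICAL" then 3 else if s = "HIGH" then 2 else if s = "MEDIUM" then 1 else 0 := by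
  by_cases h4 : s = "CRITICAL"
  · subst h4; decide
  by_cases h3 : s = "HIGH"
  · subst h3; decide
  by_cases h2 : s = "MEDIUM"
  · subst h2; decide
  by_cases h1 : s = "LOW"
  · subst h1; decide
  have hb1 : ("LOW" == s) = false := beq_eq_false_iff_ne.mpr (fun h => h1 h.symm)
  have hb2 : ("MEDIUM" == s) = false := beq_eq_false_iff_ne.mpr (fun h => h2 h.symm)
  have hb3 : ("HIGH" == s) = false := beq_eq_false_iff_ne.mpr (fun h => h3 h.symm)
  have hb4 : ("CRITICAL" == s) = false := beq_eq_false_iff_ne.mpr (fun h => h4 h.symm)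
  simp [pvRank, PySem.Dict.getD, hb1, hb2, hb3, hb4,
    PySem.Dict.get?, h2, h3, h4]

theorem pvRank_le (s : String) : pvRank s ≤ 3 := by
  rw [pvRank_cases]; split_ifs <;> omega

def pvBest (l : List (List (String × String))) : Nat :=
  l.foldl (fun best e => let r := pvRank (pvSev e); if r > best then r else best) 0

theorem foldl_ge (l : List (List (String × String))) (b k : Nat) :
    k ≤ l.foldl (fun best e => let r := pvRank (pvSev e); if r > best then r else best) b ↔
      k ≤ b ∨ ∃ e ∈ l, k ≤ pvRank (pvSev e) := by
  induction l generalizing b with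
  | nil => simp
  | cons e t ih =>
    rw [List.foldl_cons, ih]
    simp only [List.mem_cons]
    constructor
    · rintro (h | ⟨e', he', hk⟩)
      · by_cases hgt : pvRank (pvSev e) > b
        · simp only [hgt, if_pos] at h; exact Or.inr ⟨e, Or.inl rfl, h⟩
        · simp only [hgt, if_neg, not_false_iff] at h; exact Or.inl h
      · exact Or.inr ⟨e', Or.inr he', hk⟩
    · rintro (h | ⟨e', (rfl | he'), hk⟩)
      · refine Or.inl ?_; split_ifs with hgt
        · omega
        · exact h
      · refine Or.inl ?_; split_ifs with hgt
        · exact hk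
        · omega
      · exact Or.inr ⟨e', he', hk⟩

theorem foldl_le3 (l : List (List (String × String))) (b : Nat) (hb : b ≤ 3) :
    l.foldl (fun best e => let r := pvRank (pvSev e); if r > best then r else best) b ≤ 3 := by
  induction l generalizing b with
  | nil => simpa
  | cons e t ih =>
    rw [List.foldl_cons]
    refine ih _ ?_
    by_cases h : pvRank (pvSev e) > b
    · simpa [h] using pvRank_le (pvSev e)
    · simpa [h] using hb

theorem pvBest_ge (l : List (List (String × String))) (k : Nat) (hk : 1 ≤ k) :
    k ≤ pvBest l ↔ ∃ e ∈ l, k ≤ pvRank (pvSev e) := by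
  rw [pvBest, foldl_ge]
  have h0 : ¬ k ≤ 0 := by omega
  simp [h0]

theorem contains_iff (l : List (List (String × String))) (s : String) :
    (l.map pvSev).contains s = true ↔ ∃ e ∈ l, pvSev e = s := by
  simp [eq_comm]

-- ===== VERDICT (by name: the statement is the Claim_ definition above) =====
theorem calculate_exposure_risk_py_spec : Claim_equal_calculate_exposure_risk_py := by
  intro exposures _
  show calculate_exposure_risk_py exposures = calculate_exposure_risk_py_alt exposures
  have hle : pvBest exposures ≤ 3 := foldl_le3 _ 0 (by omega)
  have hB : calculate_exposure_risk_py_alt exposures =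
      ["LOW", "MEDIUM", "HIGH", "CRITICAL"].getD (pvBest exposures) "LOW" := rfl
  simp only [calculate_exposure_risk_py]
  split_ifs with h0 hc hh hm
  · subst h0; rfl
  · -- CRITICAL present
    rw [hB]
    obtain ⟨e, he, hs⟩ := (contains_iff _ _).mp hc
    have : 3 ≤ pvBest exposures := (pvBest_ge _ 3 (by omega)).mpr
      ⟨e, he, by rw [pvRank_cases, hs]; simp⟩
    have : pvBest exposures = 3 := by omega
    rw [this]; rfl
  · -- HIGH present, no CRITICAL
    rw [hB]
    obtain ⟨e, he, hs⟩ := (contains_iff _ _).mp hh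
    have h2 : 2 ≤ pvBest exposures := (pvBest_ge _ 2 (by omega)).mpr
      ⟨e, he, by rw [pvRank_cases, hs]; simp⟩
    have h3 : ¬ 3 ≤ pvBest exposures := by
      intro h
      obtain ⟨e', he', hr⟩ := (pvBest_ge _ 3 (by omega)).mp h
      rw [pvRank_cases] at hr
      have : pvSev e' = "CRITICAL" := by
        by_contra hne; simp [hne] at hr; split_ifs at hr <;> omega
      exact hc ((contains_iff _ _).mpr ⟨e', he', this⟩)
    have : pvBest exposures = 2 := by omega
    rw [this]; rfl
  · -- MEDIUM present, no CRITICAL/HIGH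
    rw [hB]
    obtain ⟨e, he, hs⟩ := (contains_iff _ _).mp hm
    have h1 : 1 ≤ pvBest exposures := (pvBest_ge _ 1 (by omega)).mpr
      ⟨e, he, by rw [pvRank_cases, hs]; simp⟩
    have h2 : ¬ 2 ≤ pvBest exposures := by
      intro h
      obtain ⟨e', he', hr⟩ := (pvBest_ge _ 2 (by omega)).mp h
      rw [pvRank_cases] at hr
      by_cases hca : pvSev e' = "CRITICAL"
      · exact hc ((contains_iff _ _).mpr ⟨e', he', hca⟩)
      by_cases hha : pvSev e' = "HIGH"
      · exact hh ((contains_iff _ _).mpr ⟨e', he', hha⟩)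
      simp [hca, hha] at hr; split_ifs at hr <;> omega
    have : pvBest exposures = 1 := by omega
    rw [this]; rfl
  · -- none present
    rw [hB]
    have h1 : ¬ 1 ≤ pvBest exposures := by
      intro h
      obtain ⟨e', he', hr⟩ := (pvBest_ge _ 1 (by omega)).mp h
      rw [pvRank_cases] at hr
      by_cases hca : pvSev e' = "CRITICAL"
      · exact hc ((contains_iff _ _).mpr ⟨e', he', hca⟩)
      by_cases hha : pvSev e' = "HIGH"
      · exact hh ((contains_iff _ _).mpr ⟨e', he', hha⟩)
      by_cases hma : pvSev e' = "MEDIUM"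
      · exact hm ((contains_iff _ _).mpr ⟨e', he', hma⟩)
      simp [hca, hha, hma] at hr
    have : pvBest exposures = 0 := by omega
    rw [this]; rfl
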